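-- pv_equiv track=rewrite | github.com/Moeabdelaziz007/amrikyy | mcp/agents/creativity_agent.py | _identify_improvement_areas
-- ===== SOURCE A (Python) =====
-- from typing import Dict, List, Any, Optional
--
-- def _identify_improvement_areas(code: str) -> List[str]:
--     """Identify areas where creativity can be improved."""
--     areas = []
--
--     # Check for repetitive code
--     if code.count('def ') > 3:
--         areas.append('Multiple functions - consider design patterns')
--
--     # Check for hardcoded values
--     if any(char.isdigit() for char in code):
--         areas.append('Hardcoded values - consider configuration patterns')
--
--     # Check for long functions
--     lines = code.split('\n')
--     for line in lines:
--         if line.strip().startswith('def ') and len(line) > 50: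
--             areas.append('Long function signatures - consider parameter objects')
--
--     # Check for nested conditions
--     if code.count('if ') > 5:
--         areas.append('Multiple conditions - consider strategy or state patterns')
--
--     return areas
-- ===== SOURCE B (Python) =====
-- from typing import Dict, List, Any, Optional
--
-- def _identify_improvement_areas(code: str) -> List[str]:
--     """Identify improvement areas in a single pass over the lines."""
--     def_count = 0
--     if_count = 0
--     has_digit = False
--     long_sigs = []
--     for line in code.split('\n'):
--         def_count += line.count('def ')
--         if_count += line.count('if ')
--         has_digit = has_digit or any(c.isdigit() for c in line)
--         if line.strip().startswith('def ') and len(line) > 50: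
--             long_sigs.append('Long function signatures - consider parameter objects')
--     areas = []
--     if def_count > 3:
--         areas.append('Multiple functions - consider design patterns')
--     if has_digit:
--         areas.append('Hardcoded values - consider configuration patterns')
--     areas.extend(long_sigs)
--     if if_count > 5:
--         areas.append('Multiple conditions - consider strategy or state patterns')
--     return areas
-- ===== Notes on version B (the rewrite author's own statement) =====
-- stated objective: alternative
-- what changed: Replaces A's four independent scans of the whole string (two str.count passes, a digit scan, plus the line loop) by one traversal of the split lines that accumulates both counts, the digit flag and the long-signature messages together, assembling the result afterwards in A's order.
import Mathlib
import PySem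

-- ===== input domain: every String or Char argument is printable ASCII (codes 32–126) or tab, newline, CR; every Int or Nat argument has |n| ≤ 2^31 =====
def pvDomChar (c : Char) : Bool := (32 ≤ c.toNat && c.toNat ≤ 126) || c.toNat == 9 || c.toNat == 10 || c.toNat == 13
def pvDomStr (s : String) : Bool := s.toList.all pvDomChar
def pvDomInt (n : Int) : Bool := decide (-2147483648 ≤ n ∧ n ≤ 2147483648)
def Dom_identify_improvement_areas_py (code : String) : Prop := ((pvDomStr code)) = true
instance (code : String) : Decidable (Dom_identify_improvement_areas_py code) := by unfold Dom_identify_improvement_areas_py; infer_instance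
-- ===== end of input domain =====

-- B replaces A's four independent whole-string scans by one traversal of the split lines
-- accumulating both counts, the digit flag and the long-signature messages (objective: alternative).

-- ===== PORT A =====
def identify_improvement_areas_py (code : String) : List String :=
  let areas : List String := []
  -- if code.count('def ') > 3
  let areas := if 3 < PySem.Str.count code "def " then
    areas ++ ["Multiple functions - consider design patterns"] else areas
  -- if any(char.isdigit() for char in code)
  let areas := if code.toList.any PySem.Chars.isdigit then
    areas ++ ["Hardcoded values - consider configuration patterns"] else areas
  -- lines = code.split('\n')  (separator "\n" is nonempty, so Python's split is Chars.splitOn — exact)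
  let lines := PySem.Chars.splitOn code.toList "\n".toList
  let areas := lines.foldl (fun acc line =>
      if PySem.Chars.startswith (PySem.Chars.strip line) "def ".toList
         && decide (50 < PySem.Chars.len line) then
        acc ++ ["Long function signatures - consider parameter objects"]
      else acc) areas
  -- if code.count('if ') > 5
  if 5 < PySem.Str.count code "if " then
    areas ++ ["Multiple conditions - consider strategy or state patterns"] else areas

-- ===== PORT B =====
def identify_improvement_areas_py_alt (code : String) : List String :=
  -- single pass over the lines: (def_count, if_count, has_digit, long_sigs)
  let st := (PySem.Chars.splitOn code.toList "\n".toList).foldl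
    (fun (st : Nat × Nat × Bool × List String) line =>
      (st.1 + PySem.Chars.count line "def ".toList,
       st.2.1 + PySem.Chars.count line "if ".toList,
       st.2.2.1 || line.any PySem.Chars.isdigit,
       if PySem.Chars.startswith (PySem.Chars.strip line) "def ".toList
          && decide (50 < PySem.Chars.len line) then
         st.2.2.2 ++ ["Long function signatures - consider parameter objects"]
       else st.2.2.2))
    (0, 0, false, [])
  let areas : List String := []
  let areas := if 3 < st.1 then
    areas ++ ["Multiple functions - consider design patterns"] else areas
  let areas := if st.2.2.1 then
    areas ++ ["Hardcoded values - consider configuration patterns"] else areas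
  let areas := areas ++ st.2.2.2
  if 5 < st.2.1 then
    areas ++ ["Multiple conditions - consider strategy or state patterns"] else areas

-- ===== PRECONDITION & SPEC =====
def Spec_identify_improvement_areas_py (code : String) (out : List String) : Prop := out = identify_improvement_areas_py_alt code
instance (code : String) (out : List String) : Decidable (Spec_identify_improvement_areas_py code out) := by unfold Spec_identify_improvement_areas_py; infer_instance

-- ===== CLAIM (what is proved, stated in full; the proofs are below) =====
def Claim_equal_identify_improvement_areas_py : Prop := ∀ (code : String), Dom_identify_improvement_areas_py code → Spec_identify_improvement_areas_py code (identify_improvement_areas_py code)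

-- ===== LEMMAS AND PROOFS =====

theorem prefix_append_cons_iff (sub a b : List Char) (c : Char) (hc : c ∉ sub) :
    sub <+: (a ++ c :: b) ↔ sub <+: a := by
  constructor
  · intro h
    by_cases hl : sub.length ≤ a.length
    · have heq : sub = (a ++ c :: b).take sub.length := by
        rw [List.prefix_iff_eq_take] at h; exact h
      have : (a ++ c :: b).take sub.length = a.take sub.length := by
        rw [List.take_append]
        simp [Nat.sub_eq_zero_of_le hl]
      rw [heq, this]
      exact List.take_prefix _ _
    · exfalso
      rw [Nat.not_le] at hl
      have heq : sub = (a ++ c :: b).take sub.length := by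
        rw [List.prefix_iff_eq_take] at h; exact h
      have hc' : c ∈ sub := by
        rw [heq, List.take_append]
        refine List.mem_append_right _ ?_
        have : 1 ≤ sub.length - a.length := by omega
        cases hn : sub.length - a.length with
        | zero => omega
        | succ k => simp
      exact hc hc'
  · intro h
    exact h.trans (List.prefix_append _ _)

def pvCount (sub : List Char) : List Char → Nat
  | [] => 0
  | x :: t =>
    if sub.isPrefixOf (x :: t) then 1 + pvCount sub (t.drop (sub.length - 1))
    else pvCount sub t
termination_by l => l.length
decreasing_by
  · simp only [List.length_drop, List.length_cons]; omega
  · simp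

theorem pvCount_append_sep (sub : List Char) (c : Char) (hs : sub ≠ []) (hc : c ∉ sub) :
    ∀ (a b : List Char), pvCount sub (a ++ c :: b) = pvCount sub a + pvCount sub b := by
  suffices H : ∀ (n : Nat) (a b : List Char), a.length = n →
      pvCount sub (a ++ c :: b) = pvCount sub a + pvCount sub b by
    intro a b; exact H a.length a b rfl
  intro n
  induction n using Nat.strong_induction_on with
  | _ n ih =>
    intro a b hlen
    cases a with
    | nil =>
      have hnp : sub.isPrefixOf (c :: b) = false := by
        rw [Bool.eq_false_iff]
        intro h
        rw [List.isPrefixOf_iff_prefix] at h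
        cases sub with
        | nil => exact hs rfl
        | cons s0 st =>
          rw [List.cons_prefix_cons] at h
          exact hc (by simp [h.1])
      simp only [List.nil_append]
      simp [pvCount, hnp]
    | cons x t =>
      have hiff : sub.isPrefixOf ((x :: t) ++ c :: b) = sub.isPrefixOf (x :: t) := by
        rw [Bool.eq_iff_iff, List.isPrefixOf_iff_prefix, List.isPrefixOf_iff_prefix]
        exact prefix_append_cons_iff sub (x :: t) b c hc
      rw [List.cons_append] at hiff
      by_cases hp : sub.isPrefixOf (x :: t) = true
      · have hle : sub.length ≤ t.length + 1 := by
          have := (List.isPrefixOf_iff_prefix.mp hp).length_le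
          simpa using this
        have h1 : 1 ≤ sub.length := by
          cases sub with
          | nil => exact absurd rfl hs
          | cons _ _ => simp
        rw [List.cons_append]
        simp only [pvCount, hiff, hp, if_pos]
        have hdrop : (t ++ c :: b).drop (sub.length - 1)
            = (t.drop (sub.length - 1)) ++ c :: b := by
          rw [List.drop_append]
          have h0 : sub.length - 1 - t.length = 0 := by omega
          rw [h0]
          simp
        rw [hdrop, ih (t.drop (sub.length - 1)).length (by
            simp only [List.length_drop]
            simp at hlen
            omega) _ _ rfl]
        omega
      · have hp' : sub.isPrefixOf (x :: t) = false := by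
          rw [Bool.eq_false_iff, Ne, List.isPrefixOf_iff_prefix]
          rwa [List.isPrefixOf_iff_prefix] at hp
        rw [List.cons_append]
        simp only [pvCount, hiff, hp', Bool.false_eq_true, if_false]
        exact ih t.length (by simp at hlen; omega) _ _ rfl

theorem count_go_eq (sub : List Char) (hs : sub ≠ []) :
    ∀ (fuel : Nat) (l : List Char) (acc : Nat), l.length ≤ fuel →
      PySem.Chars.count.go sub fuel l acc = acc + pvCount sub l := by
  intro fuel
  induction fuel with
  | zero =>
    intro l acc h
    have : l = [] := List.eq_nil_of_length_eq_zero (Nat.le_zero.mp h)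
    subst this
    simp [PySem.Chars.count.go, pvCount]
  | succ f ih =>
    intro l acc h
    cases l with
    | nil => simp [PySem.Chars.count.go, pvCount]
    | cons x t =>
      rw [PySem.Chars.count.go]
      by_cases hp : sub.isPrefixOf (x :: t) = true
      · rw [if_pos hp]
        have hlen : 1 ≤ sub.length := by
          cases sub with
          | nil => exact absurd rfl hs
          | cons a b => simp
        have hdrop : (x :: t).drop sub.length = t.drop (sub.length - 1) := by
          cases sub with
          | nil => exact absurd rfl hs
          | cons a b => simp
        rw [hdrop, ih _ _ (by
          simp only [List.length_drop]
          simp at h; omega)]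
        rw [pvCount, if_pos hp]
        omega
      · rw [if_neg hp, ih _ _ (by simp at h ⊢; omega)]
        rw [pvCount, if_neg hp]

theorem count_eq_pvCount (s sub : List Char) (hs : sub ≠ []) :
    PySem.Chars.count s sub = pvCount sub s := by
  rw [PySem.Chars.count, if_neg (by simpa using hs)]
  simpa using count_go_eq sub hs s.length s 0 (Nat.le_refl _)

theorem pvCount_intercalate (sub : List Char) (c : Char) (hs : sub ≠ []) (hc : c ∉ sub) :
    ∀ (pieces : List (List Char)),
      pvCount sub (List.intercalate [c] pieces) = (pieces.map (pvCount sub)).sum := by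
  intro pieces
  induction pieces with
  | nil => simp [List.intercalate, pvCount]
  | cons p ps ih =>
    cases ps with
    | nil => simp [List.intercalate, List.intersperse]
    | cons q r =>
      have : List.intercalate [c] (p :: q :: r) = p ++ c :: List.intercalate [c] (q :: r) := by
        simp [List.intercalate, List.intersperse_cons₂]
      rw [this, pvCount_append_sep sub c hs hc, ih]
      simp

theorem splitOn_cons_char (c y : Char) (t : List Char) :
    List.splitOn c (y :: t)
      = if y = c then [] :: t.splitOn c else (t.splitOn c).modifyHead (y :: ·) := by
  simp only [List.splitOn, List.splitOnP_cons, beq_iff_eq]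

theorem splitOn_go_eq (c : Char) :
    ∀ (fuel : Nat) (l cur : List Char) (acc : List (List Char)), l.length ≤ fuel →
      PySem.Chars.splitOn.go [c] fuel l cur acc
        = acc.reverse ++ (l.splitOn c).modifyHead (cur.reverse ++ ·) := by
  intro fuel
  induction fuel with
  | zero =>
    intro l cur acc h
    have : l = [] := List.eq_nil_of_length_eq_zero (Nat.le_zero.mp h)
    subst this
    simp [PySem.Chars.splitOn.go, List.splitOn]
  | succ f ih =>
    intro l cur acc h
    cases l with
    | nil => simp [PySem.Chars.splitOn.go, List.splitOn]
    | cons x t =>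
      rw [PySem.Chars.splitOn.go]
      by_cases hx : c = x
      · subst hx
        rw [if_pos (by simp)]
        have hdrop : List.drop [c].length (c :: t) = t := by simp
        rw [hdrop, ih t [] (cur.reverse :: acc) (by simp at h; omega)]
        rw [splitOn_cons_char c c t, if_pos rfl]
        simp
        cases List.splitOn c t <;> simp
      · rw [if_neg (by simp [hx])]
        rw [ih t (x :: cur) acc (by simp at h; omega)]
        congr 1
        rw [splitOn_cons_char c x t, if_neg (Ne.symm hx), List.modifyHead_modifyHead]
        congr 1
        funext ys
        simp

theorem chars_splitOn_single (s : List Char) (c : Char) :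
    PySem.Chars.splitOn s [c] = s.splitOn c := by
  rw [PySem.Chars.splitOn, splitOn_go_eq c (s.length + 1) s [] [] (by omega)]
  simp
  cases List.splitOn c s <;> simp

theorem count_splitOn_sum (s sub : List Char) (c : Char) (hs : sub ≠ []) (hc : c ∉ sub) :
    PySem.Chars.count s sub
      = ((PySem.Chars.splitOn s [c]).map (fun l => PySem.Chars.count l sub)).sum := by
  rw [chars_splitOn_single]
  conv_lhs => rw [← List.intercalate_splitOn c (xs := s)]
  rw [count_eq_pvCount _ _ hs, pvCount_intercalate sub c hs hc]
  congr 1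
  exact List.map_congr_left (fun l _ => (count_eq_pvCount l sub hs).symm)

theorem any_intercalate (c : Char) (p : Char → Bool) (hp : p c = false) :
    ∀ (pieces : List (List Char)),
      (List.intercalate [c] pieces).any p = pieces.any (fun l => l.any p) := by
  intro pieces
  induction pieces with
  | nil => simp [List.intercalate]
  | cons q ps ih =>
    cases ps with
    | nil => simp [List.intercalate, List.intersperse]
    | cons r rs =>
      have : List.intercalate [c] (q :: r :: rs) = q ++ c :: List.intercalate [c] (r :: rs) := by
        simp [List.intercalate, List.intersperse_cons₂]
      rw [this]
      simp [List.any_append, hp, ih]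

theorem any_splitOn (s : List Char) (c : Char) (p : Char → Bool) (hp : p c = false) :
    s.any p = (PySem.Chars.splitOn s [c]).any (fun l => l.any p) := by
  rw [chars_splitOn_single]
  conv_lhs => rw [← List.intercalate_splitOn c (xs := s)]
  exact any_intercalate c p hp _

theorem foldB_eq (lines : List (List Char)) :
    ∀ (a b : Nat) (dg : Bool) (ms : List String),
      lines.foldl
        (fun (st : Nat × Nat × Bool × List String) line =>
          (st.1 + PySem.Chars.count line "def ".toList,
           st.2.1 + PySem.Chars.count line "if ".toList,
           st.2.2.1 || line.any PySem.Chars.isdigit,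
           if PySem.Chars.startswith (PySem.Chars.strip line) "def ".toList
              && decide (50 < PySem.Chars.len line) then
             st.2.2.2 ++ ["Long function signatures - consider parameter objects"]
           else st.2.2.2))
        (a, b, dg, ms)
      = (a + (lines.map (fun l => PySem.Chars.count l "def ".toList)).sum,
         b + (lines.map (fun l => PySem.Chars.count l "if ".toList)).sum,
         dg || lines.any (fun l => l.any PySem.Chars.isdigit),
         ms ++ (lines.filter (fun line =>
             PySem.Chars.startswith (PySem.Chars.strip line) "def ".toList
               && decide (50 < PySem.Chars.len line))).map
           (fun _ => "Long function signatures - consider parameter objects")) := by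
  induction lines with
  | nil => simp
  | cons l ls ih =>
    intro a b dg ms
    rw [List.foldl_cons, ih, List.filter_cons]
    by_cases hcond : (PySem.Chars.startswith (PySem.Chars.strip l) "def ".toList
        && decide (50 < PySem.Chars.len l)) = true
    · rw [if_pos hcond, if_pos hcond]
      simp only [List.map_cons, List.sum_cons, List.any_cons, List.map_cons]
      refine Prod.ext ?_ (Prod.ext ?_ (Prod.ext ?_ ?_)) <;> simp [Nat.add_assoc, Bool.or_assoc]
    · rw [if_neg hcond, if_neg hcond]
      simp only [List.map_cons, List.sum_cons, List.any_cons]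
      refine Prod.ext ?_ (Prod.ext ?_ (Prod.ext ?_ ?_)) <;> simp [Nat.add_assoc, Bool.or_assoc]

theorem main_eq (code : String) :
    identify_improvement_areas_py code = identify_improvement_areas_py_alt code := by
  unfold identify_improvement_areas_py identify_improvement_areas_py_alt
  simp only []
  rw [foldB_eq, PySem.List.foldl_append_if]
  have hnl : "\n".toList = ['\n'] := rfl
  have hdef : PySem.Str.count code "def "
      = ((PySem.Chars.splitOn code.toList "\n".toList).map
          (fun l => PySem.Chars.count l "def ".toList)).sum := by
    rw [PySem.Str.count, hnl]
    exact count_splitOn_sum _ _ '\n' (by decide) (by decide)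
  have hif : PySem.Str.count code "if "
      = ((PySem.Chars.splitOn code.toList "\n".toList).map
          (fun l => PySem.Chars.count l "if ".toList)).sum := by
    rw [PySem.Str.count, hnl]
    exact count_splitOn_sum _ _ '\n' (by decide) (by decide)
  have hdig : code.toList.any PySem.Chars.isdigit
      = (PySem.Chars.splitOn code.toList "\n".toList).any
          (fun l => l.any PySem.Chars.isdigit) := by
    rw [hnl]
    exact any_splitOn _ '\n' _ (by decide)
  rw [hdef, hif, hdig]
  simp

-- ===== VERDICT (by name: the statement is the Claim_ definition above) =====
theorem identify_improvement_areas_py_spec : Claim_equal_identify_improvement_areas_py := by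
  intro code _
  unfold Spec_identify_improvement_areas_py
  exact main_eq code
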